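-- pv_equiv track=rewrite | github.com/ralgond/legal_retrieval | machine_learning6/build_dataset.py | _find_citation_anchor
-- ===== SOURCE A (Python) =====
-- from typing import Optional
--
-- def _find_citation_anchor(
--     sentences: list[str],
--     citation_id: str,
--     preferred_near: Optional[int] = None,
-- ) -> Optional[int]:
--     """在sentences中找citation_id首次出现的句子索引（优先靠近preferred_near）。"""
--     candidates = []
--     for i, sent in enumerate(sentences):
--         if citation_id in sent:
--             candidates.append(i)
--     if not candidates:
--         return None
--     if preferred_near is None:
--         return candidates[0]
--     return min(candidates, key=lambda x: abs(x - preferred_near))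
-- ===== SOURCE B (Python) =====
-- from typing import Optional
--
-- def _find_citation_anchor(
--     sentences: list[str],
--     citation_id: str,
--     preferred_near: Optional[int] = None,
-- ) -> Optional[int]:
--     n = len(sentences)
--     if preferred_near is None:
--         for i, sent in enumerate(sentences):
--             if citation_id in sent:
--                 return i
--         return None
--     if n == 0:
--         return None
--     q = min(max(preferred_near, 0), n - 1)
--     dmax = max(q, n - 1 - q)
--     for d in range(dmax + 1):
--         lo = q - d
--         if 0 <= lo < n and citation_id in sentences[lo]:
--             return lo
--         hi = q + d
--         if d > 0 and 0 <= hi < n and citation_id in sentences[hi]: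
--             return hi
--     return None
-- ===== Notes on version B (the rewrite author's own statement) =====
-- stated objective: alternative
-- what changed: Instead of collecting all matching indices and taking min by distance, B scans left-to-right with early return when preferred_near is None, and otherwise searches outward from preferred_near by increasing distance d, probing index p-d before p+d, returning the first in-range sentence containing citation_id.
import Mathlib
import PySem

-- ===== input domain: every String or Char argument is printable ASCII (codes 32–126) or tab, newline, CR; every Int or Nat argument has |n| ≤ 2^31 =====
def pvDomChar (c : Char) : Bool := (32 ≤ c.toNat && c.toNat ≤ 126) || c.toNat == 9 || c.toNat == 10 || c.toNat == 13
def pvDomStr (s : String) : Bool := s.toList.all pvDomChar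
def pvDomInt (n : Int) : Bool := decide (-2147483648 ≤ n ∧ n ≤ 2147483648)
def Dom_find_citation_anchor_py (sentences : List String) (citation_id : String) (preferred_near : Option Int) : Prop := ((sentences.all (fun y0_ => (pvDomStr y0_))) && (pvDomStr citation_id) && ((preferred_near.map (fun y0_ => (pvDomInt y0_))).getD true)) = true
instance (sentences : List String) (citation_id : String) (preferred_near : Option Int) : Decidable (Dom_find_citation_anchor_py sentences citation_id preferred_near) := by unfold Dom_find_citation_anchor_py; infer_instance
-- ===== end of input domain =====

-- B replaces A's "collect all matching indices, then min by |i-p|" by an early-return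
-- left-to-right scan (preferred_near = None) resp. an outward probe from preferred_near
-- (p-d before p+d, d = 0,1,…): a different algorithm of similar cost ("alternative").

-- ===== PORT A =====
-- candidates = [i for i,sent in enumerate(sentences) if citation_id in sent] (as a foldl, like A's loop)
def find_citation_anchor_py (sentences : List String) (citation_id : String) (preferred_near : Option Int) : Option Int :=
  let candidates := (PySem.List.enumerate sentences 0).foldl
    (fun acc p => if PySem.Str.isIn citation_id p.2 then acc ++ [p.1] else acc) []
  if candidates = [] then none
  else
    match preferred_near with
    | none => candidates[0]?
    | some p => PySem.List.min? candidates (fun x => |x - p|)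

-- ===== PORT B =====
-- first i with citation_id in sentences[i], early return (B's None path)
def pvFirstMatch (cid : String) : List (Int × String) → Option Int
  | [] => none
  | (i, s) :: rest => if PySem.Str.isIn cid s then some i else pvFirstMatch cid rest

-- 0 <= i < n and citation_id in sentences[i]
def pvHit (xs : List String) (cid : String) (n i : Int) : Bool :=
  decide (0 ≤ i) && decide (i < n) && PySem.Str.isIn cid (PySem.List.pyGetD xs i "")

-- for d in range(dmax+1): probe q-d then (if d>0) q+d; fuel counts the remaining iterations
def pvOutward (xs : List String) (cid : String) (n p : Int) : Nat → Int → Option Int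
  | 0, _ => none
  | fuel + 1, d =>
    if pvHit xs cid n (p - d) then some (p - d)
    else if 0 < d ∧ pvHit xs cid n (p + d) then some (p + d)
    else pvOutward xs cid n p fuel (d + 1)

def find_citation_anchor_py_alt (sentences : List String) (citation_id : String) (preferred_near : Option Int) : Option Int :=
  match preferred_near with
  | none => pvFirstMatch citation_id (PySem.List.enumerate sentences 0)
  | some p =>
    let n : Int := sentences.length
    if n = 0 then none
    else
      let q : Int := min (max p 0) (n - 1)
      let dmax : Nat := max q.toNat (n - 1 - q).toNat
      pvOutward sentences citation_id n q (dmax + 1) 0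

-- ===== PRECONDITION & SPEC =====
def Spec_find_citation_anchor_py (sentences : List String) (citation_id : String) (preferred_near : Option Int) (out : Option Int) : Prop := out = find_citation_anchor_py_alt sentences citation_id preferred_near
instance (sentences : List String) (citation_id : String) (preferred_near : Option Int) (out : Option Int) : Decidable (Spec_find_citation_anchor_py sentences citation_id preferred_near out) := by unfold Spec_find_citation_anchor_py; infer_instance

-- ===== CLAIM (what is proved, stated in full; the proofs are below) =====
def Claim_equal_find_citation_anchor_py : Prop := ∀ (sentences : List String) (citation_id : String) (preferred_near : Option Int), Dom_find_citation_anchor_py sentences citation_id preferred_near → Spec_find_citation_anchor_py sentences citation_id preferred_near (find_citation_anchor_py sentences citation_id preferred_near)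

-- ===== LEMMAS AND PROOFS =====

-- the list of matching indices, counted from s (specification of A's candidates list)
def pvMatches (cid : String) : List String → Int → List Int
  | [], _ => []
  | x :: t, s => if PySem.Str.isIn cid x then s :: pvMatches cid t (s + 1) else pvMatches cid t (s + 1)

theorem pvMatches_foldl (cid : String) (xs : List String) (s : Int) (acc : List Int) :
    (PySem.List.enumerate xs s).foldl
      (fun acc p => if PySem.Str.isIn cid p.2 then acc ++ [p.1] else acc) acc
      = acc ++ pvMatches cid xs s := by
  induction xs generalizing s acc with
  | nil => simp [pvMatches, PySem.List.enumerate_nil]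
  | cons x t ih =>
    rw [PySem.List.enumerate_cons, List.foldl_cons]
    simp only [pvMatches]
    by_cases h : PySem.Str.isIn cid x = true
    · rw [if_pos h, if_pos h, ih]; simp
    · rw [if_neg h, if_neg h, ih]

theorem pvFirstMatch_eq_head? (cid : String) (xs : List String) (s : Int) :
    pvFirstMatch cid (PySem.List.enumerate xs s) = (pvMatches cid xs s).head? := by
  induction xs generalizing s with
  | nil => simp [pvFirstMatch, pvMatches, PySem.List.enumerate_nil]
  | cons x t ih =>
    rw [PySem.List.enumerate_cons]
    simp only [pvFirstMatch, pvMatches]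
    by_cases h : PySem.Str.isIn cid x = true
    · rw [if_pos h, if_pos h]; rfl
    · rw [if_neg h, if_neg h, ih]

theorem pvMatches_mem (cid : String) (xs : List String) (s c : Int) :
    c ∈ pvMatches cid xs s ↔
      ∃ k : Nat, ∃ h : k < xs.length, c = s + k ∧ PySem.Str.isIn cid (xs[k]) = true := by
  induction xs generalizing s with
  | nil => simp [pvMatches]
  | cons x t ih =>
    simp only [pvMatches]
    constructor
    · intro hmem
      have step : c ∈ pvMatches cid t (s + 1) →
          ∃ k : Nat, ∃ h : k < (x :: t).length, c = s + k ∧ PySem.Str.isIn cid ((x :: t)[k]) = true := by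
        intro h
        obtain ⟨k, hk, hc, hin⟩ := (ih (s + 1)).1 h
        refine ⟨k + 1, by simpa using Nat.succ_lt_succ hk, ?_, by simpa using hin⟩
        push_cast at hc ⊢
        omega
      split at hmem
      · rcases List.mem_cons.1 hmem with h | h
        · exact ⟨0, by simp, by simpa using h, by simpa using ‹PySem.Str.isIn cid x = true›⟩
        · exact step h
      · exact step hmem
    · rintro ⟨k, hk, hc, hin⟩
      cases k with
      | zero =>
        simp only [List.getElem_cons_zero] at hin
        rw [if_pos hin]
        have : c = s := by push_cast at hc; omega
        subst this; exact List.mem_cons_self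
      | succ k =>
        have hc' : c = (s + 1) + (k : Int) := by push_cast at hc ⊢; omega
        have hmem : c ∈ pvMatches cid t (s + 1) :=
          (ih (s + 1)).2 ⟨k, by simpa using Nat.lt_of_succ_lt_succ hk, hc', by simpa using hin⟩
        split <;> simp [hmem]

-- the candidate predicate used by the outward search
def pvCand (xs : List String) (cid : String) (c : Int) : Prop :=
  0 ≤ c ∧ c < (xs.length : Int) ∧ PySem.Str.isIn cid (PySem.List.pyGetD xs c "") = true

theorem pvCand_iff_mem (xs : List String) (cid : String) (c : Int) :
    pvCand xs cid c ↔ c ∈ pvMatches cid xs 0 := by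
  rw [pvMatches_mem]
  constructor
  · rintro ⟨h0, hn, hin⟩
    refine ⟨c.toNat, by omega, by omega, ?_⟩
    rwa [PySem.List.pyGetD_eq_getElem xs "" h0 hn] at hin
  · rintro ⟨k, hk, hc, hin⟩
    have h0 : (0 : Int) ≤ c := by omega
    have hn : c < (xs.length : Int) := by omega
    refine ⟨h0, hn, ?_⟩
    rw [PySem.List.pyGetD_eq_getElem xs "" h0 hn]
    have : c.toNat = k := by omega
    simpa [this] using hin

theorem pvHit_iff (xs : List String) (cid : String) (i : Int) :
    pvHit xs cid (xs.length : Int) i = true ↔ pvCand xs cid i := by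
  simp [pvHit, pvCand, and_assoc]

-- unique characterisation of "nearest candidate, lower index on a tie"
def pvGood (xs : List String) (cid : String) (p m : Int) : Prop :=
  pvCand xs cid m ∧ (∀ y, pvCand xs cid y → |m - p| ≤ |y - p|) ∧
    (∀ y, pvCand xs cid y → |y - p| = |m - p| → m ≤ y)

theorem pvGood_unique (xs : List String) (cid : String) (p m₁ m₂ : Int)
    (h₁ : pvGood xs cid p m₁) (h₂ : pvGood xs cid p m₂) : m₁ = m₂ := by
  obtain ⟨c₁, min₁, tie₁⟩ := h₁
  obtain ⟨c₂, min₂, tie₂⟩ := h₂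
  have e : |m₁ - p| = |m₂ - p| := le_antisymm (min₁ m₂ c₂) (min₂ m₁ c₁)
  exact le_antisymm (tie₁ m₂ c₂ e.symm) (tie₂ m₁ c₁ e)

-- min? with strict-< replacement keeps the FIRST extremal element; on a strictly
-- increasing list that is the least index among equal keys
theorem pvMin?_first (key : Int → Int) (xs : List Int) (a m : Int)
    (hlt : ∀ y ∈ xs, a < y) (hx : xs.Pairwise (· < ·))
    (h : PySem.List.min? (a :: xs) key = some m) :
    (m = a ∨ m ∈ xs) ∧ key m ≤ key a ∧ (∀ y ∈ xs, key m ≤ key y) ∧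
      (key m = key a → m = a) ∧ (∀ y ∈ xs, key m = key y → m ≤ y) := by
  induction xs generalizing a with
  | nil =>
    simp only [PySem.List.min?, List.foldl_cons, List.foldl_nil, Option.some.injEq] at h
    subst h
    exact ⟨Or.inl rfl, le_refl _, by simp, fun _ => rfl, by simp⟩
  | cons x t ih =>
    have hxt : ∀ y ∈ t, x < y := fun y hy => (List.pairwise_cons.1 hx).1 y hy
    have htp : t.Pairwise (· < ·) := (List.pairwise_cons.1 hx).2
    simp only [PySem.List.min?, List.foldl_cons] at h
    by_cases hk : key x < key a
    · rw [if_pos hk] at h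
      have h' : PySem.List.min? (x :: t) key = some m := by
        simp only [PySem.List.min?, List.foldl_cons]; exact h
      obtain ⟨hm, hka, hall, hexa, htie⟩ := ih x hxt htp h'
      have hm' : m = a ∨ m ∈ x :: t := by
        rcases hm with h | h
        · subst h; exact Or.inr (List.mem_cons_self)
        · exact Or.inr (List.mem_cons_of_mem x h)
      refine ⟨hm', le_trans hka (le_of_lt hk), ?_, ?_, ?_⟩
      · intro y hy
        rcases List.mem_cons.1 hy with h | h
        · subst h; exact hka
        · exact hall y h
      · intro he
        exfalso
        have := lt_of_le_of_lt hka hk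
        rw [he] at this
        exact lt_irrefl _ this
      · intro y hy he
        rcases List.mem_cons.1 hy with h | h
        · subst h; rw [hexa he]
        · exact htie y h he
    · rw [if_neg hk] at h
      rw [not_lt] at hk
      have h' : PySem.List.min? (a :: t) key = some m := by
        simp only [PySem.List.min?, List.foldl_cons]; exact h
      obtain ⟨hm, hka, hall, hexa, htie⟩ :=
        ih a (fun y hy => hlt y (List.mem_cons_of_mem x hy)) htp h'
      have hm' : m = a ∨ m ∈ x :: t := by
        rcases hm with h | h
        · exact Or.inl h
        · exact Or.inr (List.mem_cons_of_mem x h)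
      refine ⟨hm', hka, ?_, hexa, ?_⟩
      · intro y hy
        rcases List.mem_cons.1 hy with h | h
        · subst h; exact le_trans hka hk
        · exact hall y h
      · intro y hy he
        rcases List.mem_cons.1 hy with h | h
        · subst h
          have hea : key m = key a := le_antisymm hka (he ▸ hk)
          have := hexa hea
          subst this
          exact le_of_lt (hlt y (by simp))
        · exact htie y h he

theorem pvMatches_pairwise (cid : String) (xs : List String) (s : Int) :
    (pvMatches cid xs s).Pairwise (· < ·) := by
  have key : ∀ xs s, ∀ c ∈ pvMatches cid xs s, s ≤ c := by
    intro xs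
    induction xs with
    | nil => intro s c hc; simp [pvMatches] at hc
    | cons x t ih =>
      intro s c hc
      simp only [pvMatches] at hc
      split at hc
      · rcases List.mem_cons.1 hc with h | h
        · omega
        · have := ih (s + 1) c h; omega
      · have := ih (s + 1) c hc; omega
  induction xs generalizing s with
  | nil => simp [pvMatches]
  | cons x t ih =>
    simp only [pvMatches]
    split
    · exact List.pairwise_cons.2 ⟨fun c hc => by have := key t (s + 1) c hc; omega, ih (s + 1)⟩
    · exact ih (s + 1)

theorem pvMin?_good (xs : List String) (cid : String) (p m : Int)
    (h : PySem.List.min? (pvMatches cid xs 0) (fun x => |x - p|) = some m) :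
    pvGood xs cid p m := by
  have hmem := PySem.List.min?_mem h
  have hmin := PySem.List.min?_isMin h
  rcases hC : pvMatches cid xs 0 with _ | ⟨c, t⟩
  · rw [hC] at hmem; simp at hmem
  · have hpw := pvMatches_pairwise cid xs 0
    rw [hC] at hpw hmem hmin h
    obtain ⟨hm, _, _, hexc, htie⟩ := pvMin?_first (fun x => |x - p|) t c m
      (fun y hy => (List.pairwise_cons.1 hpw).1 y hy) (List.pairwise_cons.1 hpw).2 h
    refine ⟨(pvCand_iff_mem xs cid m).2 (hC ▸ hmem), ?_, ?_⟩
    · intro y hy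
      exact hmin y (hC ▸ (pvCand_iff_mem xs cid y).1 hy)
    · intro y hy he
      have hyC : y ∈ c :: t := hC ▸ (pvCand_iff_mem xs cid y).1 hy
      rcases List.mem_cons.1 hyC with h' | h'
      · subst h'
        rw [hexc he.symm]
      · exact htie y h' he.symm

-- within [0, n), every index is at distance ≤ max |p| |n-1-p| from p
theorem pvDmax_complete (n p c : Int) (h0 : 0 ≤ c) (hn : c < n) :
    (c - p).natAbs ≤ max p.natAbs (n - 1 - p).natAbs := by
  omega

theorem pvOutward_good (xs : List String) (cid : String) (p : Int) (fuel : Nat) (d : Int)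
    (hd : 0 ≤ d)
    (hfuel : d + fuel = (max p.natAbs (((xs.length : Int) - 1 - p).natAbs) : Nat) + 1)
    (hprev : ∀ c, pvCand xs cid c → d ≤ |c - p|) :
    (∀ m, pvOutward xs cid (xs.length : Int) p fuel d = some m → pvGood xs cid p m) ∧
    (pvOutward xs cid (xs.length : Int) p fuel d = none → ∀ c, ¬ pvCand xs cid c) := by
  induction fuel generalizing d with
  | zero =>
    refine ⟨fun m hm => by simp [pvOutward] at hm, fun _ c hc => ?_⟩
    have h1 := hprev c hc
    rw [Int.abs_eq_natAbs] at h1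
    obtain ⟨h0, hn, _⟩ := hc
    have h2 := pvDmax_complete (xs.length : Int) p c h0 hn
    omega
  | succ fuel ih =>
    have hlo_abs : |p - d - p| = d := by
      have : p - d - p = -d := by ring
      rw [this, abs_neg, abs_of_nonneg hd]
    have hhi_abs : |p + d - p| = d := by
      have : p + d - p = d := by ring
      rw [this, abs_of_nonneg hd]
    have hstep : (¬ pvHit xs cid (xs.length : Int) (p - d) = true) →
        (¬ (0 < d ∧ pvHit xs cid (xs.length : Int) (p + d) = true)) →
        ∀ c, pvCand xs cid c → d + 1 ≤ |c - p| := by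
      intro hlo hhi c hc
      have h1 := hprev c hc
      have hne : |c - p| ≠ d := by
        intro he
        rcases (abs_eq hd).1 he with h | h
        · rcases eq_or_lt_of_le hd with h0 | h0
          · exact hlo ((pvHit_iff xs cid (p - d)).2
              (by rw [show p - d = c by omega]; exact hc))
          · exact hhi ⟨h0, (pvHit_iff xs cid (p + d)).2
              (by rw [show p + d = c by omega]; exact hc)⟩
        · exact hlo ((pvHit_iff xs cid (p - d)).2
            (by rw [show p - d = c by omega]; exact hc))
      exact Int.add_one_le_iff.mpr (lt_of_le_of_ne h1 (Ne.symm hne))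
    constructor
    · intro m hm
      simp only [pvOutward] at hm
      split at hm
      · -- hit at p - d
        rename_i hlo
        have hc : pvCand xs cid (p - d) := (pvHit_iff xs cid (p - d)).1 hlo
        have hme : m = p - d := by simpa using hm.symm
        subst hme
        refine ⟨hc, ?_, ?_⟩
        · intro y hy
          rw [hlo_abs]
          exact hprev y hy
        · intro y hy he
          rw [hlo_abs] at he
          rcases (abs_eq hd).1 he with h | h <;> omega
      · split at hm
        · -- hit at p + d, with 0 < d and no hit at p - d
          rename_i hlo hhi
          have hc : pvCand xs cid (p + d) := (pvHit_iff xs cid (p + d)).1 hhi.2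
          have hnlo : ¬ pvCand xs cid (p - d) := fun h =>
            hlo ((pvHit_iff xs cid (p - d)).2 h)
          have hme : m = p + d := by simpa using hm.symm
          subst hme
          refine ⟨hc, ?_, ?_⟩
          · intro y hy
            rw [hhi_abs]
            exact hprev y hy
          · intro y hy he
            rw [hhi_abs] at he
            rcases (abs_eq hd).1 he with h | h
            · omega
            · exfalso
              exact hnlo (by rw [show p - d = y by omega]; exact hy)
        · rename_i hlo hhi
          exact (ih (d + 1) (by omega) (by omega) (hstep hlo hhi)).1 m hm
    · intro hnone c hc
      simp only [pvOutward] at hnone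
      split at hnone
      · exact absurd hnone (by simp)
      · split at hnone
        · exact absurd hnone (by simp)
        · rename_i hlo hhi
          exact (ih (d + 1) (by omega) (by omega) (hstep hlo hhi)).2 hnone c hc

-- clamping preferred_near into [0, n) changes no distance comparison between in-range indices
theorem pvGood_of_clamp (xs : List String) (cid : String) (p m : Int)
    (hg : pvGood xs cid (min (max p 0) ((xs.length : Int) - 1)) m) :
    pvGood xs cid p m := by
  obtain ⟨hc, hmin, htie⟩ := hg
  obtain ⟨hm0, hmn, hmi⟩ := hc
  refine ⟨⟨hm0, hmn, hmi⟩, ?_, ?_⟩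
  · intro y hy
    have h1 := hmin y hy
    obtain ⟨hy0, hyn, _⟩ := hy
    simp only [Int.abs_eq_natAbs] at h1 ⊢
    omega
  · intro y hy he
    apply htie y hy
    obtain ⟨hy0, hyn, _⟩ := hy
    simp only [Int.abs_eq_natAbs] at he ⊢
    omega

-- membership in A's candidate list gives the candidate predicate
theorem pvCand_of_mem_matches (xs : List String) (cid : String) (c : Int)
    (h : c ∈ pvMatches cid xs 0) : pvCand xs cid c := (pvCand_iff_mem xs cid c).2 h

-- ===== VERDICT (by name: the statement is the Claim_ definition above) =====
theorem find_citation_anchor_py_spec : Claim_equal_find_citation_anchor_py := by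
  intro sentences citation_id preferred_near _
  unfold Spec_find_citation_anchor_py
  unfold find_citation_anchor_py find_citation_anchor_py_alt
  simp only [pvMatches_foldl, List.nil_append]
  rcases preferred_near with _ | p
  · -- None path
    rw [pvFirstMatch_eq_head?]
    rcases hC : pvMatches citation_id sentences 0 with _ | ⟨c, t⟩ <;> simp
  · -- Some p path
    rcases hC : pvMatches citation_id sentences 0 with _ | ⟨c, t⟩
    · -- no candidates: A returns none; B returns none (either n = 0 or outward exhausts)
      by_cases hn : (sentences.length : Int) = 0
      · simp [hn]
      · simp only [if_neg hn]
        rcases ho : pvOutward sentences citation_id (sentences.length : Int)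
            (min (max p 0) ((sentences.length : Int) - 1))
            (max (min (max p 0) ((sentences.length : Int) - 1)).toNat
              ((sentences.length : Int) - 1 - min (max p 0) ((sentences.length : Int) - 1)).toNat + 1)
            0 with _ | m
        · simp
        · exfalso
          have hg := (pvOutward_good sentences citation_id
            (min (max p 0) ((sentences.length : Int) - 1)) _ 0 (by omega) (by omega)
            (fun c hc => abs_nonneg _)).1 m ho
          have := (pvCand_iff_mem sentences citation_id m).1 hg.1
          rw [hC] at this
          simp at this
    · -- candidates nonempty
      have hne : c :: t ≠ [] := by simp
      simp only [if_neg hne]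
      have hcand : pvCand sentences citation_id c :=
        pvCand_of_mem_matches sentences citation_id c (by rw [hC]; simp)
      have hn : ¬ ((sentences.length : Int) = 0) := by
        obtain ⟨h0, h1, _⟩ := hcand; omega
      simp only [if_neg hn]
      rcases hmin : PySem.List.min? (c :: t) (fun x => |x - p|) with _ | m₁
      · rw [PySem.List.min?_eq_none_iff] at hmin; exact absurd hmin (by simp)
      · have hg₁ : pvGood sentences citation_id p m₁ :=
          pvMin?_good sentences citation_id p m₁ (by rw [hC]; exact hmin)
        rcases ho : pvOutward sentences citation_id (sentences.length : Int)
            (min (max p 0) ((sentences.length : Int) - 1))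
            (max (min (max p 0) ((sentences.length : Int) - 1)).toNat
              ((sentences.length : Int) - 1 - min (max p 0) ((sentences.length : Int) - 1)).toNat + 1)
            0 with _ | m₂
        · exfalso
          exact (pvOutward_good sentences citation_id
            (min (max p 0) ((sentences.length : Int) - 1)) _ 0 (by omega) (by omega)
            (fun c' hc' => abs_nonneg _)).2 ho c hcand
        · have hg₂ : pvGood sentences citation_id p m₂ :=
            pvGood_of_clamp sentences citation_id p m₂
              ((pvOutward_good sentences citation_id
                (min (max p 0) ((sentences.length : Int) - 1)) _ 0 (by omega) (by omega)
                (fun c' hc' => abs_nonneg _)).1 m₂ ho)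
          rw [pvGood_unique sentences citation_id p m₁ m₂ hg₁ hg₂]
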